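-- pv_equiv track=rewrite | github.com/BigDaMa/SASDT | Clustering/collapsecluster.py | get_labeled_clusters
-- ===== SOURCE A (Python) =====
-- from typing import List, Dict, Set, Tuple, Union
--
-- def get_labeled_clusters(clusters: List[Set[int]]) -> List[List[int]]:
--     numclusters = len(clusters)
--     labeled_clusters = dict()
--     final_cluster = []
--     for i, cluster in enumerate(clusters):
--         for item in cluster:
--             if item not in labeled_clusters:
--                 labeled_clusters[item] = i
--     final_cluster = [labeled_clusters[item] for item in sorted(labeled_clusters.keys())]
--     return numclusters, final_cluster
-- ===== SOURCE B (Python) =====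
-- def get_labeled_clusters(clusters):
--     pairs = [(item, i) for i, cluster in enumerate(clusters) for item in cluster]
--     pairs.sort()
--     seen = set()
--     final_cluster = []
--     for item, idx in pairs:
--         if item not in seen:
--             seen.add(item)
--             final_cluster.append(idx)
--     return len(clusters), final_cluster
-- ===== Notes on version B (the rewrite author's own statement) =====
-- stated objective: alternative
-- what changed: A builds a first-wins item->index dict in a nested loop and then reads it back over sorted keys; B flattens all memberships into (item, index) pairs, sorts them lexicographically once, and emits each item's index the first time the item appears in the sorted stream.
import Mathlib
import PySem

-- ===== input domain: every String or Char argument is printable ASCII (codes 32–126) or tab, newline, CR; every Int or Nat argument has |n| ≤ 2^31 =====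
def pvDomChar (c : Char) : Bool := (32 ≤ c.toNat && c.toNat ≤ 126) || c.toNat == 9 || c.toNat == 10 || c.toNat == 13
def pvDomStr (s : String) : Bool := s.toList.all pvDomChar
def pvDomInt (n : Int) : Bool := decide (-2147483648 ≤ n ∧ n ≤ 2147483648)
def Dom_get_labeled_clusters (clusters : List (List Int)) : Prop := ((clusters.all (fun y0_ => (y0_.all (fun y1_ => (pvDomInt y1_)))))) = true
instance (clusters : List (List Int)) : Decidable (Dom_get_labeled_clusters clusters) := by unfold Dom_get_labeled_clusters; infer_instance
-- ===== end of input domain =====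

-- B replaces A's first-wins dict + sorted-keys lookup by flattening (item, index) pairs, sorting them
-- lexicographically, and emitting each item's index on first sight (alternative decomposition, same cost class).

-- ===== PORT A =====
def get_labeled_clusters (clusters : List (List Int)) : Int × List Int :=
  let numclusters : Int := PySem.List.len clusters
  let labeled : PySem.Dict Int Int :=
    (PySem.List.enumerate clusters 0).foldl
      (fun d p => p.2.foldl (fun d item => if d.contains item then d else d.insert item p.1) d)
      PySem.Dict.empty
  -- labeled_clusters[item]: the key is always present here, ported as getD (the default is never reached)
  (numclusters,
    (PySem.List.sorted labeled.keys (fun x => x) false).map (fun item => labeled.getD item 0))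

-- ===== PORT B =====
def get_labeled_clusters_alt (clusters : List (List Int)) : Int × List Int :=
  let pairs : List (Int × Int) :=
    (PySem.List.enumerate clusters 0).foldl (fun acc p => acc ++ p.2.map (fun x => (x, p.1))) []
  let sp := PySem.List.sorted2 pairs Prod.fst Prod.snd false
  let res := sp.foldl
      (fun (st : PySem.Set Int × List Int) q =>
        if PySem.Set.contains st.1 q.1 then st else (PySem.Set.add st.1 q.1, st.2 ++ [q.2]))
      (PySem.Set.empty, [])
  (PySem.List.len clusters, res.2)

-- ===== PRECONDITION & SPEC =====
def Spec_get_labeled_clusters (clusters : List (List Int)) (out : Int × List Int) : Prop := out = get_labeled_clusters_alt clusters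
instance (clusters : List (List Int)) (out : Int × List Int) : Decidable (Spec_get_labeled_clusters clusters out) := by unfold Spec_get_labeled_clusters; infer_instance

-- ===== CLAIM (what is proved, stated in full; the proofs are below) =====
def Claim_equal_get_labeled_clusters : Prop := ∀ (clusters : List (List Int)), Dom_get_labeled_clusters clusters → Spec_get_labeled_clusters clusters (get_labeled_clusters clusters)

-- ===== LEMMAS AND PROOFS =====

-- A's first-wins dict step, over one (item, cluster index) pair.
def pvFw (d : PySem.Dict Int Int) (q : Int × Int) : PySem.Dict Int Int :=
  if d.contains q.1 then d else d.insert q.1 q.2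

-- All memberships flattened to (item, cluster index) pairs, in traversal order.
def pvPairs (clusters : List (List Int)) : List (Int × Int) :=
  (PySem.List.enumerate clusters 0).flatMap (fun p => p.2.map (fun x => (x, p.1)))

-- Second component of the FIRST pair carrying the given item.
def pvFirstVal (l : List (Int × Int)) (x : Int) : Int :=
  ((l.find? (fun q => q.1 == x)).map Prod.snd).getD 0

-- Elements of the second list not yet in s, first occurrences, in order.
def pvNk (s : List Int) : List Int → List Int
  | [] => []
  | x :: xs => if PySem.Set.contains s x then pvNk s xs else x :: pvNk (s ++ [x]) xs

-- B's scan, as a recursion on the pair list.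
def pvEmit (s : List Int) : List (Int × Int) → List Int
  | [] => []
  | q :: l => if PySem.Set.contains s q.1 then pvEmit s l else q.2 :: pvEmit (s ++ [q.1]) l

def pvLexLE (a b : Int × Int) : Prop := a.1 < b.1 ∨ (a.1 = b.1 ∧ a.2 ≤ b.2)

-- The comparison sorted2 inserts by (lexicographic strict order on the two keys).
def pvBef (a b : Int × Int) : Bool :=
  decide (a.1 < b.1) || (!decide (b.1 < a.1) && decide (a.2 < b.2))

theorem pv_nested_eq_pairs (l : List (Int × List Int)) (d : PySem.Dict Int Int) :
    l.foldl (fun d p => p.2.foldl (fun d item => if d.contains item then d else d.insert item p.1) d) d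
      = (l.flatMap (fun p => p.2.map (fun x => (x, p.1)))).foldl pvFw d := by
  induction l generalizing d with
  | nil => rfl
  | cons p l ih =>
    simp only [List.foldl_cons, List.flatMap_cons, List.foldl_append, List.foldl_map, ih]
    rfl

theorem pv_fw_get? (l : List (Int × Int)) (d : PySem.Dict Int Int) (x : Int) :
    (l.foldl pvFw d).get? x = (d.get? x).or ((l.find? (fun q => q.1 == x)).map Prod.snd) := by
  induction l generalizing d with
  | nil => simp
  | cons q l ih =>
    simp only [List.foldl_cons, ih, pvFw]
    by_cases hx : q.1 = x
    · subst hx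
      rw [List.find?_cons_of_pos (by simp)]
      by_cases hc : d.contains q.1
      · have hs : (d.get? q.1).isSome := by
          rw [Option.isSome_iff_ne_none]
          intro hn
          rw [PySem.Dict.get?_eq_none_iff_contains] at hn
          simp [hn] at hc
        simp only [hc, if_true, Option.or_of_isSome hs]
      · have hn : d.get? q.1 = none := (PySem.Dict.get?_eq_none_iff_contains d q.1).2 (by simpa using hc)
        simp [hc, hn]
    · rw [List.find?_cons_of_neg (by simp [hx])]
      by_cases hc : d.contains q.1
      · simp [hc]
      · rw [if_neg hc, PySem.Dict.get?_insert_of_ne _ _ (fun h => hx h.symm)]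

theorem pv_fw_keys (l : List (Int × Int)) (d : PySem.Dict Int Int) :
    (l.foldl pvFw d).keys = PySem.Set.update d.keys (l.map Prod.fst) := by
  induction l generalizing d with
  | nil => rfl
  | cons q l ih =>
    simp only [List.foldl_cons, List.map_cons, PySem.Set.update, ih]
    congr 1
    show (pvFw d q).keys = PySem.Set.add d.keys q.1
    unfold pvFw PySem.Set.add
    by_cases hc : d.contains q.1
    · rw [if_pos hc, if_pos]
      rw [PySem.Set.contains]
      simpa [List.contains_iff_mem] using (PySem.Dict.contains_iff_mem_keys d q.1).1 hc
    · rw [if_neg hc, if_neg, PySem.Dict.keys_insert_of_not_contains _ _ (by simpa using hc)]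
      rw [PySem.Set.contains]
      intro h
      exact hc ((PySem.Dict.contains_iff_mem_keys d q.1).2 (by simpa [List.contains_iff_mem] using h))

theorem pv_scan_eq_emit (l : List (Int × Int)) (s : PySem.Set Int) (out : List Int) :
    (l.foldl (fun (st : PySem.Set Int × List Int) q =>
        if PySem.Set.contains st.1 q.1 then st else (PySem.Set.add st.1 q.1, st.2 ++ [q.2])) (s, out)).2
      = out ++ pvEmit s l := by
  induction l generalizing s out with
  | nil => simp [pvEmit]
  | cons q l ih =>
    simp only [List.foldl_cons, pvEmit]
    by_cases hc : PySem.Set.contains s q.1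
    · simp only [hc, if_true, ih]
    · rw [if_neg hc]
      have ha : PySem.Set.add s q.1 = s ++ [q.1] := by rw [PySem.Set.add, if_neg hc]
      rw [if_neg hc, ha, ih]
      simp

theorem pv_mem_nk {s xs : List Int} {x : Int} (h : x ∈ pvNk s xs) : x ∈ xs ∧ x ∉ s := by
  induction xs generalizing s with
  | nil => simp [pvNk] at h
  | cons y ys ih =>
    unfold pvNk at h
    by_cases hc : PySem.Set.contains s y
    · rw [if_pos hc] at h
      obtain ⟨h1, h2⟩ := ih h
      exact ⟨List.mem_cons_of_mem _ h1, h2⟩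
    · rw [if_neg hc] at h
      rcases List.mem_cons.1 h with rfl | h
      · refine ⟨List.mem_cons_self, ?_⟩
        intro hs
        exact hc (by simpa [PySem.Set.contains, List.contains_iff_mem] using hs)
      · obtain ⟨h1, h2⟩ := ih h
        exact ⟨List.mem_cons_of_mem _ h1, fun hs => h2 (List.mem_append_left _ hs)⟩

theorem pv_mem_nk_iff (s xs : List Int) (x : Int) : x ∈ pvNk s xs ↔ x ∈ xs ∧ x ∉ s := by
  constructor
  · exact pv_mem_nk
  · intro ⟨h1, h2⟩
    induction xs generalizing s with
    | nil => simp at h1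
    | cons y ys ih =>
      unfold pvNk
      by_cases hc : PySem.Set.contains s y
      · rw [if_pos hc]
        rcases List.mem_cons.1 h1 with rfl | h1'
        · exact absurd (by simpa [PySem.Set.contains, List.contains_iff_mem] using hc) h2
        · exact ih _ h1' h2
      · rw [if_neg hc]
        rcases List.mem_cons.1 h1 with rfl | h1'
        · exact List.mem_cons_self
        · by_cases hxy : x = y
          · subst hxy; exact List.mem_cons_self
          · exact List.mem_cons_of_mem _ (ih _ h1' (by
              intro hm
              rcases List.mem_append.1 hm with hm | hm
              · exact h2 hm
              · exact hxy (List.mem_singleton.1 hm)))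

theorem pv_nk_sublist (s xs : List Int) : (pvNk s xs).Sublist xs := by
  induction xs generalizing s with
  | nil => simp [pvNk]
  | cons y ys ih =>
    unfold pvNk
    by_cases hc : PySem.Set.contains s y
    · rw [if_pos hc]; exact (ih s).cons _
    · rw [if_neg hc]; exact (ih (s ++ [y])).cons₂ _

theorem pv_nk_nodup (s xs : List Int) : (pvNk s xs).Nodup := by
  induction xs generalizing s with
  | nil => simp [pvNk]
  | cons y ys ih =>
    unfold pvNk
    by_cases hc : PySem.Set.contains s y
    · rw [if_pos hc]; exact ih s
    · rw [if_neg hc]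
      refine List.Nodup.cons ?_ (ih (s ++ [y]))
      intro hmem
      exact (pv_mem_nk hmem).2 (List.mem_append_right _ (List.mem_singleton.2 rfl))

theorem pv_emit_eq_map (l : List (Int × Int)) (s : List Int) :
    pvEmit s l = (pvNk s (l.map Prod.fst)).map (pvFirstVal l) := by
  induction l generalizing s with
  | nil => simp [pvEmit, pvNk]
  | cons q l ih =>
    simp only [pvEmit, List.map_cons, pvNk]
    by_cases hc : PySem.Set.contains s q.1
    · rw [if_pos hc, if_pos hc, ih]
      refine List.map_congr_left ?_
      intro x hx
      have hne : x ≠ q.1 := by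
        intro h
        exact (pv_mem_nk hx).2 (by simpa [PySem.Set.contains, List.contains_iff_mem, h] using hc)
      unfold pvFirstVal
      rw [List.find?_cons_of_neg (by simpa using fun h => hne h.symm)]
    · rw [if_neg hc, if_neg hc, ih]
      simp only [List.map_cons]
      congr 1
      · unfold pvFirstVal
        rw [List.find?_cons_of_pos (by simp)]
        rfl
      · refine List.map_congr_left ?_
        intro x hx
        have hne : x ≠ q.1 := by
          intro h
          subst h
          exact (pv_mem_nk hx).2 (List.mem_append_right _ (List.mem_singleton.2 rfl))
        unfold pvFirstVal
        rw [List.find?_cons_of_neg (by simpa using fun h => hne h.symm)]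

theorem pv_lexLE_trans {a b c : Int × Int} (h1 : pvLexLE a b) (h2 : pvLexLE b c) : pvLexLE a c := by
  unfold pvLexLE at *; omega

theorem pv_bef_true {a b : Int × Int} (h : pvBef a b = true) : pvLexLE a b := by
  simp only [pvBef, Bool.or_eq_true, Bool.and_eq_true, Bool.not_eq_true', decide_eq_true_eq,
    decide_eq_false_iff_not] at h
  unfold pvLexLE; omega

theorem pv_bef_false {a b : Int × Int} (h : pvBef a b = false) : pvLexLE b a := by
  simp only [pvBef, Bool.or_eq_false_iff, Bool.and_eq_false_iff, Bool.not_eq_false',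
    decide_eq_true_eq, decide_eq_false_iff_not] at h
  unfold pvLexLE; omega

theorem pv_insertBy_pw (x : Int × Int) (ys : List (Int × Int)) (h : ys.Pairwise pvLexLE) :
    (PySem.List.insertBy pvBef x ys).Pairwise pvLexLE := by
  induction ys with
  | nil => simp [PySem.List.insertBy]
  | cons y ys ih =>
    rw [List.pairwise_cons] at h
    obtain ⟨hy, hys⟩ := h
    by_cases hb : pvBef x y
    · rw [PySem.List.insertBy, if_pos hb]
      refine List.Pairwise.cons ?_ (List.Pairwise.cons hy hys)
      intro z hz
      rcases List.mem_cons.1 hz with rfl | hz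
      · exact pv_bef_true hb
      · exact pv_lexLE_trans (pv_bef_true hb) (hy z hz)
    · rw [PySem.List.insertBy, if_neg hb]
      refine List.Pairwise.cons ?_ (ih hys)
      intro z hz
      rcases (PySem.List.mem_insertBy _ _ _ _).1 hz with rfl | hz
      · exact pv_bef_false (Bool.eq_false_iff.2 hb)
      · exact hy z hz

theorem pv_sorted2_pw (xs : List (Int × Int)) :
    (PySem.List.sorted2 xs Prod.fst Prod.snd false).Pairwise pvLexLE := by
  have aux : ∀ (l : List (Int × Int)) (acc : List (Int × Int)), acc.Pairwise pvLexLE →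
      (l.foldl (fun acc x => PySem.List.insertBy pvBef x acc) acc).Pairwise pvLexLE := by
    intro l
    induction l with
    | nil => intro acc h; exact h
    | cons a l ih =>
      intro acc h
      exact ih _ (pv_insertBy_pw a acc h)
  have hrw : PySem.List.sorted2 xs Prod.fst Prod.snd false
      = xs.foldl (fun acc x => PySem.List.insertBy pvBef x acc) [] := by
    simp only [PySem.List.sorted2]
    rfl
  rw [hrw]
  exact aux xs [] (by simp)

theorem pv_find?_first_min (x : Int) (l : List (Int × Int))
    (hpw : l.Pairwise (fun a b => a.1 = x → b.1 = x → a.2 ≤ b.2)) {y : Int × Int}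
    (hy : l.find? (fun q => q.1 == x) = some y) :
    y.1 = x ∧ ∀ q ∈ l, q.1 = x → y.2 ≤ q.2 := by
  induction l with
  | nil => simp at hy
  | cons a l ih =>
    rw [List.pairwise_cons] at hpw
    obtain ⟨ha, hl⟩ := hpw
    by_cases hax : a.1 = x
    · rw [List.find?_cons_of_pos (by simpa using hax)] at hy
      cases hy
      refine ⟨hax, ?_⟩
      intro q hq hqx
      rcases List.mem_cons.1 hq with rfl | hq
      · exact le_refl _
      · exact ha q hq hax hqx
    · rw [List.find?_cons_of_neg (by simpa using hax)] at hy
      obtain ⟨h1, h2⟩ := ih hl hy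
      refine ⟨h1, ?_⟩
      intro q hq hqx
      rcases List.mem_cons.1 hq with rfl | hq
      · exact absurd hqx hax
      · exact h2 q hq hqx

theorem pv_pairs_snd_mono (clusters : List (List Int)) :
    (pvPairs clusters).Pairwise (fun a b => a.2 ≤ b.2) := by
  unfold pvPairs
  rw [List.pairwise_flatMap]
  constructor
  · intro p _
    rw [List.pairwise_map]
    exact List.pairwise_of_forall (fun _ _ => le_refl _)
  · refine (PySem.List.pairwise_lt_enumerate clusters 0).imp ?_
    intro p q hpq a ha b hb
    obtain ⟨_, _, rfl⟩ := List.mem_map.1 ha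
    obtain ⟨_, _, rfl⟩ := List.mem_map.1 hb
    exact le_of_lt hpq

theorem pv_find?_agree (clusters : List (List Int)) (x : Int)
    (hx : x ∈ (pvPairs clusters).map Prod.fst) :
    (PySem.List.sorted2 (pvPairs clusters) Prod.fst Prod.snd false).find? (fun q => q.1 == x)
      = (pvPairs clusters).find? (fun q => q.1 == x) := by
  set P := pvPairs clusters with hP
  set sp := PySem.List.sorted2 P Prod.fst Prod.snd false with hsp
  have hperm : sp.Perm P := PySem.List.sorted2_perm P Prod.fst Prod.snd false
  obtain ⟨q0, hq0, hq0x⟩ := List.mem_map.1 hx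
  have h1 : ((P.find? (fun q => q.1 == x)).isSome) := by
    rw [List.find?_isSome]; exact ⟨q0, hq0, by simpa using hq0x⟩
  have h2 : ((sp.find? (fun q => q.1 == x)).isSome) := by
    rw [List.find?_isSome]; exact ⟨q0, hperm.mem_iff.2 hq0, by simpa using hq0x⟩
  obtain ⟨y1, hy1⟩ := Option.isSome_iff_exists.1 h2
  obtain ⟨y2, hy2⟩ := Option.isSome_iff_exists.1 h1
  have m1 := pv_find?_first_min x sp
    (((pv_sorted2_pw P)).imp (by
      intro a b hab h1 h2
      rcases hab with h | h
      · omega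
      · exact h.2)) hy1
  have m2 := pv_find?_first_min x P
    ((pv_pairs_snd_mono clusters).imp (fun hab _ _ => hab)) hy2
  have hy1P : y1 ∈ P := hperm.mem_iff.1 (List.mem_of_find?_eq_some hy1)
  have hy2sp : y2 ∈ sp := hperm.mem_iff.2 (List.mem_of_find?_eq_some hy2)
  have hle1 : y1.2 ≤ y2.2 := m1.2 y2 hy2sp m2.1
  have hle2 : y2.2 ≤ y1.2 := m2.2 y1 hy1P m1.1
  have : y1 = y2 := Prod.ext (m1.1.trans m2.1.symm) (le_antisymm hle1 hle2)
  rw [hy1, hy2, this]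

theorem pv_main (clusters : List (List Int)) :
    get_labeled_clusters clusters = get_labeled_clusters_alt clusters := by
  unfold get_labeled_clusters get_labeled_clusters_alt
  have hpairs : (PySem.List.enumerate clusters 0).foldl
      (fun acc p => acc ++ p.2.map (fun x => (x, p.1))) [] = pvPairs clusters := by
    rw [PySem.List.foldl_append_eq_flatMap]; rfl
  set P := pvPairs clusters with hP
  set sp := PySem.List.sorted2 P Prod.fst Prod.snd false with hsp
  set S : PySem.Set Int := PySem.Set.ofList (P.map Prod.fst) with hS
  have hperm : sp.Perm P := PySem.List.sorted2_perm P Prod.fst Prod.snd false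
  have hlab : (PySem.List.enumerate clusters 0).foldl
      (fun d p => p.2.foldl (fun d item => if d.contains item then d else d.insert item p.1) d)
      PySem.Dict.empty = P.foldl pvFw PySem.Dict.empty := pv_nested_eq_pairs _ _
  have hkeys : (P.foldl pvFw PySem.Dict.empty).keys = S := by
    rw [pv_fw_keys]
    simp only [PySem.Dict.keys_empty]
    rfl
  have hgetD : ∀ k, (P.foldl pvFw PySem.Dict.empty).getD k 0 = pvFirstVal P k := by
    intro k
    rw [PySem.Dict.getD_eq_get?_getD, pv_fw_get?, PySem.Dict.get?_empty, Option.none_or]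
    rfl
  have hnk : pvNk PySem.Set.empty (sp.map Prod.fst) = PySem.List.sorted S (fun x => x) false := by
    refine (PySem.List.sorted_eq_of_perm_of_pairwise_lt S _ _ ?_ ?_).symm
    · refine (List.perm_ext_iff_of_nodup (pv_nk_nodup _ _) (PySem.Set.nodup_ofList _)).2 ?_
      intro a
      rw [pv_mem_nk_iff]
      simp [PySem.Set.empty, PySem.Set.mem_ofList, (hperm.map Prod.fst).mem_iff]
    · have hle : (sp.map Prod.fst).Pairwise (· ≤ ·) :=
        (pv_sorted2_pw P).map Prod.fst (by
          intro a b hab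
          rcases hab with h | h
          · exact le_of_lt h
          · exact le_of_eq h.1)
      have hne : (pvNk PySem.Set.empty (sp.map Prod.fst)).Pairwise (· ≠ ·) := pv_nk_nodup _ _
      have hle' : (pvNk PySem.Set.empty (sp.map Prod.fst)).Pairwise (· ≤ ·) :=
        hle.sublist (pv_nk_sublist _ _)
      exact (hle'.and hne).imp (fun h => lt_of_le_of_ne h.1 h.2)
  simp only [hpairs, hlab, hkeys]
  refine Prod.ext rfl ?_
  show (PySem.List.sorted S (fun x => x) false).map (fun item => (P.foldl pvFw PySem.Dict.empty).getD item 0)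
      = (sp.foldl (fun (st : PySem.Set Int × List Int) q =>
        if PySem.Set.contains st.1 q.1 then st else (PySem.Set.add st.1 q.1, st.2 ++ [q.2]))
        (PySem.Set.empty, [])).2
  rw [pv_scan_eq_emit, List.nil_append, pv_emit_eq_map, hnk]
  refine List.map_congr_left ?_
  intro x hx
  rw [← hnk] at hx
  have hxsp : x ∈ sp.map Prod.fst := (pv_mem_nk hx).1
  have hxP : x ∈ P.map Prod.fst := ((hperm.map Prod.fst).mem_iff).1 hxsp
  rw [hgetD]
  unfold pvFirstVal
  rw [pv_find?_agree clusters x hxP]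

-- ===== VERDICT (by name: the statement is the Claim_ definition above) =====
theorem get_labeled_clusters_spec : Claim_equal_get_labeled_clusters := by
  intro clusters _
  unfold Spec_get_labeled_clusters
  exact pv_main clusters
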